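-- pv_equiv track=rewrite | github.com/bakku/advent-of-code | aopy-2024/day09.py | is_compact
-- ===== SOURCE A (Python) =====
-- def is_compact(blocks):
--     free_space_visited = False
--
--     for block in blocks:
--         if block == ".":
--             free_space_visited = True
--         else:
--             if free_space_visited:
--                 return False
--
--     return True
-- ===== SOURCE B (Python) =====
-- def is_compact(blocks):
--     blocks = list(blocks)
--     files = [b for b in blocks if b != "."]
--     return blocks[:len(files)] == files
-- ===== Notes on version B (the rewrite author's own statement) =====
-- stated objective: simpler
-- what changed: Instead of scanning with a free-space-visited flag, B builds the canonical compacted image (all non-free blocks, in order) and declares the layout compact iff the list's prefix of that length equals it.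
import Mathlib
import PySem

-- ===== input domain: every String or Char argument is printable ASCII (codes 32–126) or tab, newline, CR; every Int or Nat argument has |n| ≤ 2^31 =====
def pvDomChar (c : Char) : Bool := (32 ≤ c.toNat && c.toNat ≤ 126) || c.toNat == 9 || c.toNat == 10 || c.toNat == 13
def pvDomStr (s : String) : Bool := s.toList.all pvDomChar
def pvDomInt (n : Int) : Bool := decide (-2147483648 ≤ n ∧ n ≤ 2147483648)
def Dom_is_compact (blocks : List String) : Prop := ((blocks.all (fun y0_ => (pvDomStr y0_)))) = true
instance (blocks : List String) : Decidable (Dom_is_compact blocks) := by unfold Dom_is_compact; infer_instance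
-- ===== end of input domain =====

-- B replaces A's flagged scan by comparing the list's prefix to its own canonical compacted image (simpler decomposition; same O(n)).
-- ===== PORT A =====
-- A's for-loop with the free_space_visited flag, as structural recursion carrying the flag
def isCompactLoop : List String → Bool → Bool
  | [], _ => true
  | b :: rest, fsv =>
    if b == "." then isCompactLoop rest true
    else if fsv then false else isCompactLoop rest fsv

def is_compact (blocks : List String) : Bool := isCompactLoop blocks false

-- ===== PORT B =====
-- files = [b for b in blocks if b != "."]; return blocks[:len(files)] == files
def is_compact_alt (blocks : List String) : Bool :=
  let files := blocks.filter (fun b => b != ".")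
  blocks.take files.length == files

-- ===== PRECONDITION & SPEC =====
def Spec_is_compact (blocks : List String) (out : Bool) : Prop := out = is_compact_alt blocks
instance (blocks : List String) (out : Bool) : Decidable (Spec_is_compact blocks out) := by unfold Spec_is_compact; infer_instance

-- ===== CLAIM (what is proved, stated in full; the proofs are below) =====
def Claim_equal_is_compact : Prop := ∀ (blocks : List String), Dom_is_compact blocks → Spec_is_compact blocks (is_compact blocks)

-- ===== LEMMAS AND PROOFS =====

-- once the flag is set, A's loop accepts exactly an all-"." tail, i.e. an empty filtered remainder
theorem loop_true_eq_filter_nil (l : List String) :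
    isCompactLoop l true = (l.filter (fun b => b != ".") == []) := by
  induction l with
  | nil => rfl
  | cons b rest ih =>
    simp only [isCompactLoop, List.filter_cons]
    by_cases h : b = "." <;> simp [h, ih]

theorem loop_false_eq_alt (l : List String) :
    isCompactLoop l false = is_compact_alt l := by
  induction l with
  | nil => rfl
  | cons b rest ih =>
    simp only [isCompactLoop, is_compact_alt, List.filter_cons]
    by_cases h : b = "."
    · -- head is ".": dropped by the filter; A's loop runs with the flag set
      rw [if_pos (by simp [h]), loop_true_eq_filter_nil]
      rcases hf : rest.filter (fun b => b != ".") with _ | ⟨f, fs⟩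
      · simp [h]
      · have hmem : f ∈ rest.filter (fun b => b != ".") := by rw [hf]; exact List.mem_cons_self
        have hfne : (f != ".") = true := (List.mem_filter.mp hmem).2
        have hbf : b ≠ f := by
          intro hbf; rw [h] at hbf; simp [← hbf] at hfne
        have hfd : f ≠ "." := by simpa using hfne
        simp [h, List.take_succ_cons, Ne.symm hfd]
    · -- head is a file block: kept by the filter
      rw [if_neg (by simp [h]), if_neg (by simp), ih]
      simp [h, is_compact_alt, List.take_succ_cons]

-- ===== VERDICT (by name: the statement is the Claim_ definition above) =====
theorem is_compact_spec : Claim_equal_is_compact := by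
  intro blocks _
  unfold Spec_is_compact is_compact
  exact loop_false_eq_alt blocks
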